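-- pv_equiv track=rewrite | github.com/w2ria/APP-ENCRIPTACION | services/cifrado_transposicion_serie.py | procesar_transposicion_serie
-- ===== SOURCE A (Python) =====
-- def es_primo(n):
--     if n < 2:
--         return False
--     for i in range(2, int(n ** 0.5) + 1):
--         if n % i == 0:
--             return False
--     return True
--
-- def obtener_series(longitud):
--     ms1_pos, ms2_pos, ms3_pos = [], [], []
--
--     for i in range(1, longitud + 1):
--         if es_primo(i):
--             ms1_pos.append(i)
--         elif i % 2 == 0:
--             ms2_pos.append(i)
--         else:
--             ms3_pos.append(i)
--
--     return ms1_pos, ms2_pos, ms3_pos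
--
-- def procesar_transposicion_serie(mensaje):
--     # Eliminar espacios y poner en mayúsculas el mensaje
--     mensaje = mensaje.replace(" ", "").upper().replace(",", "")
--
--     # Obtener las posiciones de MS1, MS2 y MS3 según la longitud del mensaje
--     ms1_pos, ms2_pos, ms3_pos = obtener_series(len(mensaje))
--
--     # Listas para almacenar los caracteres de cada serie
--     ms1, ms2, ms3 = [], [], []
--
--     # Clasificar los caracteres según las posiciones
--     for i in range(1, len(mensaje) + 1):
--         if i in ms1_pos:
--             ms1.append(mensaje[i - 1])
--         elif i in ms2_pos:
--             ms2.append(mensaje[i - 1])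
--         elif i in ms3_pos:
--             ms3.append(mensaje[i - 1])
--
--     # Concatenar las series en el orden MS1 + MS2 + MS3
--     mensaje_cifrado = ''.join(ms1) + ''.join(ms2) + ''.join(ms3)
--
--     return mensaje_cifrado
-- ===== SOURCE B (Python) =====
-- def _es_primo(n):
--     if n < 2:
--         return False
--     i = 2
--     while i * i <= n:
--         if n % i == 0:
--             return False
--         i += 1
--     return True
--
-- def procesar_transposicion_serie(mensaje):
--     mensaje = mensaje.replace(" ", "").upper().replace(",", "")
--     primos, pares, impares = [], [], []
--     for idx, ch in enumerate(mensaje, 1):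
--         if _es_primo(idx):
--             primos.append(ch)
--         elif idx % 2 == 0:
--             pares.append(ch)
--         else:
--             impares.append(ch)
--     return "".join(primos + pares + impares)
-- ===== Notes on version B (the rewrite author's own statement) =====
-- stated objective: faster
-- what changed: B drops A's precomputed position lists and the linear membership scans A performs for every character, classifying each index in a single enumerate pass with a direct trial-division primality test.
import Mathlib
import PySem

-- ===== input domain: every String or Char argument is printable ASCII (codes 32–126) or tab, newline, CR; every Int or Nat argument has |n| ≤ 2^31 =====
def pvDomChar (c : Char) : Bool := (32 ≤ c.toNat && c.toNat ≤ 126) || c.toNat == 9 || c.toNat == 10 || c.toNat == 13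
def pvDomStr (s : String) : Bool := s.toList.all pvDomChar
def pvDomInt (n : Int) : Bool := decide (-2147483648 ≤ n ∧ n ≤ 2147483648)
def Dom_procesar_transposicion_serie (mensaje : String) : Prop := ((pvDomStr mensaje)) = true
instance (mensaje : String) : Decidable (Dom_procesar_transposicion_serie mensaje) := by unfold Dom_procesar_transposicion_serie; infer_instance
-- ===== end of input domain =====

-- B replaces A's precomputed position lists and the O(n) membership scans of the
-- classification loop by one enumerate pass that tests each index directly (objective: faster).

-- ===== PORT A =====
-- int(n ** 0.5) ported as Nat.sqrt: exact for the lengths that occur here (0 ≤ n < 2^52)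
def pvIsqrt (n : Int) : Int := (Nat.sqrt n.toNat : Int)

def es_primo (n : Int) : Bool :=
  if n < 2 then false
  else if (PySem.List.pyRange 2 (pvIsqrt n + 1) 1).any (fun i => PySem.Int.mod n i == 0) then false
  else true

def obtener_series (longitud : Int) : List Int × List Int × List Int :=
  (PySem.List.pyRange 1 (longitud + 1) 1).foldl
    (fun (st : List Int × List Int × List Int) i =>
      if es_primo i then (st.1 ++ [i], st.2.1, st.2.2)
      else if PySem.Int.mod i 2 == 0 then (st.1, st.2.1 ++ [i], st.2.2)
      else (st.1, st.2.1, st.2.2 ++ [i]))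
    ([], [], [])

def procesar_transposicion_serie (mensaje : String) : String :=
  let m : List Char :=
    (PySem.Str.replace (PySem.Str.upper (PySem.Str.replace mensaje " " "")) "," "").toList
  let n : Int := PySem.List.len m
  let s := obtener_series n
  let st := (PySem.List.pyRange 1 (n + 1) 1).foldl
    (fun (acc : List Char × List Char × List Char) i =>
      if s.1.contains i then (acc.1 ++ [PySem.List.pyGetD m (i - 1) ' '], acc.2.1, acc.2.2)
      else if s.2.1.contains i then (acc.1, acc.2.1 ++ [PySem.List.pyGetD m (i - 1) ' '], acc.2.2)
      else if s.2.2.contains i then (acc.1, acc.2.1, acc.2.2 ++ [PySem.List.pyGetD m (i - 1) ' '])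
      else acc)
    ([], [], [])
  -- ''.join(ms1) + ''.join(ms2) + ''.join(ms3) on char lists = String.ofList of the concatenation (exact)
  String.ofList (st.1 ++ st.2.1 ++ st.2.2)

-- ===== PORT B =====
-- while i * i <= n: if n % i == 0: return False ; i += 1   (n ≥ 2 here, so n.toNat is exact;
-- the fuel argument only makes the loop structurally total: n + 1 - i ≤ fuel always holds at the call)
def pvTrialLoop (n : Nat) : Nat → Nat → Bool
  | _, 0 => true
  | i, fuel + 1 =>
    if i * i ≤ n then
      (if n % i == 0 then false else pvTrialLoop n (i + 1) fuel)
    else true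

def es_primo_alt (n : Int) : Bool :=
  if n < 2 then false else pvTrialLoop n.toNat 2 (n.toNat + 1)

def procesar_transposicion_serie_alt (mensaje : String) : String :=
  let m : List Char :=
    (PySem.Str.replace (PySem.Str.upper (PySem.Str.replace mensaje " " "")) "," "").toList
  let st := (PySem.List.enumerate m 1).foldl
    (fun (acc : List Char × List Char × List Char) p =>
      if es_primo_alt p.1 then (acc.1 ++ [p.2], acc.2.1, acc.2.2)
      else if PySem.Int.mod p.1 2 == 0 then (acc.1, acc.2.1 ++ [p.2], acc.2.2)
      else (acc.1, acc.2.1, acc.2.2 ++ [p.2]))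
    ([], [], [])
  String.ofList (st.1 ++ st.2.1 ++ st.2.2)

-- ===== PRECONDITION & SPEC =====
def Spec_procesar_transposicion_serie (mensaje : String) (out : String) : Prop := out = procesar_transposicion_serie_alt mensaje
instance (mensaje : String) (out : String) : Decidable (Spec_procesar_transposicion_serie mensaje out) := by unfold Spec_procesar_transposicion_serie; infer_instance

-- ===== CLAIM (what is proved, stated in full; the proofs are below) =====
def Claim_equal_procesar_transposicion_serie : Prop := ∀ (mensaje : String), Dom_procesar_transposicion_serie mensaje → Spec_procesar_transposicion_serie mensaje (procesar_transposicion_serie mensaje)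

-- ===== LEMMAS AND PROOFS =====

-- B's while-loop finds a divisor j with i ≤ j and j*j ≤ n iff one exists
theorem pvTrialLoop_eq_true (n : Nat) :
    ∀ (fuel i : Nat), n + 1 - i ≤ fuel →
      (pvTrialLoop n i fuel = true ↔ ∀ j, i ≤ j → j * j ≤ n → n % j ≠ 0) := by
  intro fuel
  induction fuel with
  | zero =>
    intro i hf
    simp only [pvTrialLoop, true_iff]
    intro j hij hjj
    rcases Nat.eq_zero_or_pos j with rfl | hj
    · omega
    · have : j ≤ j * j := Nat.le_mul_of_pos_left j hj
      omega
  | succ fuel ih =>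
    intro i hf
    rw [pvTrialLoop]
    by_cases hle : i * i ≤ n
    · rw [if_pos hle]
      have hin : i ≤ n := by
        rcases Nat.eq_zero_or_pos i with rfl | hi
        · omega
        · have : i ≤ i * i := Nat.le_mul_of_pos_left i hi
          omega
      by_cases hdvd : (n % i == 0) = true
      · rw [if_pos hdvd]
        constructor
        · intro h; cases h
        · intro h; exact absurd (by simpa using hdvd) (h i le_rfl hle)
      · rw [if_neg hdvd, ih (i + 1) (by omega)]
        constructor
        · intro h j hij hjj
          rcases Nat.eq_or_lt_of_le hij with rfl | hlt
          · simpa using hdvd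
          · exact h j hlt hjj
        · intro h j hij hjj; exact h j (le_of_lt hij) hjj
    · rw [if_neg hle]
      constructor
      · intro _ j hij hjj
        exact absurd (le_trans (Nat.mul_le_mul hij hij) hjj) hle
      · intro _; rfl

-- the two primality tests agree on every Int
theorem es_primo_alt_eq : es_primo_alt = es_primo := by
  funext n
  unfold es_primo_alt es_primo
  by_cases h2 : n < 2
  · simp [h2]
  · simp only [h2, if_false]
    have hn : (0:Int) ≤ n := by omega
    have hncast : ((n.toNat : Int)) = n := Int.toNat_of_nonneg hn
    have hany : ((PySem.List.pyRange 2 (pvIsqrt n + 1) 1).any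
        (fun i => PySem.Int.mod n i == 0)) = true ↔
        ∃ j : Nat, 2 ≤ j ∧ j * j ≤ n.toNat ∧ n.toNat % j = 0 := by
      rw [List.any_eq_true]
      constructor
      · rintro ⟨i, hmem, hdvd⟩
        rw [PySem.List.mem_pyRange_one] at hmem
        obtain ⟨h2i, hiu⟩ := hmem
        refine ⟨i.toNat, by omega, ?_, ?_⟩
        · have : i.toNat ≤ Nat.sqrt n.toNat := by
            unfold pvIsqrt at hiu; omega
          exact Nat.le_sqrt.mp this
        · have : PySem.Int.mod n i = 0 := by simpa using hdvd
          rw [← hncast, ← Int.toNat_of_nonneg (show (0:Int) ≤ i by omega)] at this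
          rw [PySem.Int.mod_natCast] at this
          exact_mod_cast this
      · rintro ⟨j, h2j, hjj, hdvd⟩
        refine ⟨(j : Int), ?_, ?_⟩
        · rw [PySem.List.mem_pyRange_one]
          have : j ≤ Nat.sqrt n.toNat := Nat.le_sqrt.mpr hjj
          unfold pvIsqrt; omega
        · simp only [beq_iff_eq]
          rw [← hncast, PySem.Int.mod_natCast, hdvd]; rfl
    rw [Bool.eq_iff_iff]
    by_cases hA : ((PySem.List.pyRange 2 (pvIsqrt n + 1) 1).any
        (fun i => PySem.Int.mod n i == 0)) = true
    · obtain ⟨j, h2j, hjj, hdvd⟩ := hany.mp hA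
      simp only [hA, if_true]
      rw [pvTrialLoop_eq_true n.toNat (n.toNat + 1) 2 (by omega)]
      constructor
      · intro h; exact absurd hdvd (h j h2j hjj)
      · intro h; cases h
    · simp only [hA]
      rw [pvTrialLoop_eq_true n.toNat (n.toNat + 1) 2 (by omega)]
      constructor
      · intro _; rfl
      · intro _ j h2j hjj hdvd
        exact hA (hany.mpr ⟨j, h2j, hjj, hdvd⟩)

-- shape of both classification loops: three lists grown by disjoint conditions are three filters
theorem foldl_triple {α β : Type} (p q : α → Bool) (f : α → β) (l : List α)
    (a b c : List β) :
    l.foldl (fun acc x =>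
        if p x then (acc.1 ++ [f x], acc.2.1, acc.2.2)
        else if q x then (acc.1, acc.2.1 ++ [f x], acc.2.2)
        else (acc.1, acc.2.1, acc.2.2 ++ [f x])) (a, b, c)
    = (a ++ (l.filter p).map f,
       b ++ (l.filter (fun x => !p x && q x)).map f,
       c ++ (l.filter (fun x => !p x && !q x)).map f) := by
  induction l generalizing a b c with
  | nil => simp
  | cons x xs ih =>
    by_cases hp : p x <;> by_cases hq : q x <;>
      simp [List.foldl_cons, hp, hq, ih]

-- A's series are exactly the filters of range(1, n+1)
theorem obtener_series_eq (n : Int) :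
    obtener_series n =
      ((PySem.List.pyRange 1 (n + 1) 1).filter es_primo,
       (PySem.List.pyRange 1 (n + 1) 1).filter
         (fun i => !es_primo i && (PySem.Int.mod i 2 == 0)),
       (PySem.List.pyRange 1 (n + 1) 1).filter
         (fun i => !es_primo i && !(PySem.Int.mod i 2 == 0))) := by
  unfold obtener_series
  rw [foldl_triple es_primo (fun i => PySem.Int.mod i 2 == 0) (fun i => i)]
  simp

-- enumerate(m, s) written over List.range
theorem enumerate_eq_range {α : Type} (m : List α) (s : Int) (d : α) :
    PySem.List.enumerate m s
      = (List.range m.length).map (fun (k : Nat) => (s + (k : Int), m.getD k d)) := by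
  induction m generalizing s with
  | nil => simp [PySem.List.enumerate_nil]
  | cons x xs ih =>
    rw [PySem.List.enumerate_cons, ih (s + 1)]
    rw [List.length_cons, List.range_succ_eq_map, List.map_cons, List.map_map]
    congr 1
    · simp
    · apply List.map_congr_left
      intro k _
      have h1 : s + 1 + (k : Int) = s + ((k + 1 : Nat) : Int) := by push_cast; ring
      simp [Function.comp, h1]

-- the filtered enumerate pass equals the filtered index pass
theorem filter_enum_eq (m : List Char) (P : Int → Bool) :
    (((PySem.List.enumerate m 1).filter (fun pr => P pr.1)).map Prod.snd)
      = (((PySem.List.pyRange 1 ((m.length : Int) + 1) 1).filter P).map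
          (fun i => PySem.List.pyGetD m (i - 1) ' ')) := by
  rw [enumerate_eq_range m 1 ' ', PySem.List.pyRange_one]
  have hl : (((m.length : Int) + 1 - 1)).toNat = m.length := by omega
  rw [hl, List.filter_map, List.filter_map, List.map_map, List.map_map]
  apply List.map_congr_left
  intro k hk
  simp only [Function.comp]
  have : (1 + (k : Int)) - 1 = (k : Int) := by ring
  rw [this, PySem.List.pyGetD_natCast]

theorem main_eq (mensaje : String) :
    procesar_transposicion_serie mensaje = procesar_transposicion_serie_alt mensaje := by
  unfold procesar_transposicion_serie procesar_transposicion_serie_alt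
  simp only [PySem.List.len_eq, obtener_series_eq, es_primo_alt_eq]
  set m : List Char :=
    (PySem.Str.replace (PySem.Str.upper (PySem.Str.replace mensaje " " "")) "," "").toList
    with hm
  set R : List Int := PySem.List.pyRange 1 ((m.length : Int) + 1) 1 with hR
  have hbody :
      R.foldl
        (fun (acc : List Char × List Char × List Char) i =>
          if (R.filter es_primo).contains i then
            (acc.1 ++ [PySem.List.pyGetD m (i - 1) ' '], acc.2.1, acc.2.2)
          else if (R.filter (fun i => !es_primo i && (PySem.Int.mod i 2 == 0))).contains i then
            (acc.1, acc.2.1 ++ [PySem.List.pyGetD m (i - 1) ' '], acc.2.2)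
          else if (R.filter (fun i => !es_primo i && !(PySem.Int.mod i 2 == 0))).contains i then
            (acc.1, acc.2.1, acc.2.2 ++ [PySem.List.pyGetD m (i - 1) ' '])
          else acc)
        ([], [], [])
      = R.foldl
        (fun (acc : List Char × List Char × List Char) i =>
          if es_primo i then (acc.1 ++ [PySem.List.pyGetD m (i - 1) ' '], acc.2.1, acc.2.2)
          else if PySem.Int.mod i 2 == 0 then
            (acc.1, acc.2.1 ++ [PySem.List.pyGetD m (i - 1) ' '], acc.2.2)
          else (acc.1, acc.2.1, acc.2.2 ++ [PySem.List.pyGetD m (i - 1) ' ']))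
        ([], [], []) := by
    apply PySem.List.foldl_congr_mem
    intro acc i hi
    have c1 : (R.filter es_primo).contains i = es_primo i := by
      rw [Bool.eq_iff_iff, List.contains_iff_mem, List.mem_filter]
      simp [hi]
    have c2 : (R.filter (fun i => !es_primo i && (PySem.Int.mod i 2 == 0))).contains i
        = (!es_primo i && (PySem.Int.mod i 2 == 0)) := by
      rw [Bool.eq_iff_iff, List.contains_iff_mem, List.mem_filter]
      simp [hi]
    have c3 : (R.filter (fun i => !es_primo i && !(PySem.Int.mod i 2 == 0))).contains i
        = (!es_primo i && !(PySem.Int.mod i 2 == 0)) := by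
      rw [Bool.eq_iff_iff, List.contains_iff_mem, List.mem_filter]
      simp [hi]
    rw [c1, c2, c3]
    by_cases hp : es_primo i <;> by_cases hq : (PySem.Int.mod i 2 == 0) <;>
      simp only [hp, hq, Bool.not_true, Bool.not_false, Bool.and_true, Bool.and_false,
        Bool.and_self, if_true]
  rw [hbody,
    foldl_triple es_primo (fun i => PySem.Int.mod i 2 == 0)
      (fun i => PySem.List.pyGetD m (i - 1) ' ') R,
    foldl_triple (fun pr : Int × Char => es_primo pr.1)
      (fun pr : Int × Char => PySem.Int.mod pr.1 2 == 0) Prod.snd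
      (PySem.List.enumerate m 1)]
  simp only [List.nil_append]
  have e1 := filter_enum_eq m es_primo
  have e2 := filter_enum_eq m (fun i => !es_primo i && (PySem.Int.mod i 2 == 0))
  have e3 := filter_enum_eq m (fun i => !es_primo i && !(PySem.Int.mod i 2 == 0))
  rw [← hR] at e1 e2 e3
  rw [← e1, ← e2, ← e3]

-- ===== VERDICT (by name: the statement is the Claim_ definition above) =====
theorem procesar_transposicion_serie_spec : Claim_equal_procesar_transposicion_serie := by
  intro mensaje _
  unfold Spec_procesar_transposicion_serie
  exact main_eq mensaje
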